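-- pv_equiv track=rewrite | github.com/ckc5800/LLM_TTS_benchmark | infra/zipvoice_engine_src/tts_engine/utils/text_base.py | chunk_by_punctuation
-- ===== SOURCE A (Python) =====
-- from typing import List, Set
--
-- PUNCTUATION: Set[str] = {
--     ";", ":", ",", ".", "!", "?",
--     "；", "：", "，", "。", "！", "？",
--     "、", "…", "·",
-- }
--
-- def chunk_by_punctuation(tokens: List[str], max_tokens: int = 100) -> List[List[str]]:
--     """토큰 리스트를 구두점 기준으로 청킹합니다."""
--     sentences = []
--     current_sentence = []
--
--     for token in tokens:
--         if (
--             len(current_sentence) == 0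
--             and len(sentences) != 0
--             and (token in PUNCTUATION or token == " ")
--         ):
--             sentences[-1].append(token)
--         else:
--             current_sentence.append(token)
--             if token in PUNCTUATION:
--                 sentences.append(current_sentence)
--                 current_sentence = []
--
--     if current_sentence:
--         sentences.append(current_sentence)
--
--     chunks = []
--     current_chunk = []
--
--     for sentence in sentences:
--         if len(current_chunk) + len(sentence) <= max_tokens:
--             current_chunk.extend(sentence)
--         else:
--             if current_chunk:
--                 chunks.append(current_chunk)
--             current_chunk = sentence
--
--     if current_chunk:
--         chunks.append(current_chunk)
--
--     return chunks
-- ===== SOURCE B (Python) =====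
-- from typing import List, Set
--
-- PUNCTUATION: Set[str] = {
--     ";", ":", ",", ".", "!", "?",
--     "；", "：", "，", "。", "！", "？",
--     "、", "…", "·",
-- }
--
-- def chunk_by_punctuation(tokens: List[str], max_tokens: int = 100) -> List[List[str]]:
--     """Single fused pass: no intermediate sentence list; sentences are packed
--     into chunks as soon as they can no longer receive trailing punctuation."""
--     chunks: List[List[str]] = []
--     chunk: List[str] = []
--     pending = None          # last closed sentence, may still receive trailing tokens
--     cur: List[str] = []     # sentence under construction
--
--     def pack(s):
--         nonlocal chunk
--         if len(chunk) + len(s) <= max_tokens: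
--             chunk += s
--         else:
--             if chunk:
--                 chunks.append(chunk)
--             chunk = list(s)
--
--     for token in tokens:
--         if pending is not None and not cur and (token in PUNCTUATION or token == " "):
--             pending.append(token)
--         else:
--             cur.append(token)
--             if token in PUNCTUATION:
--                 if pending is not None:
--                     pack(pending)
--                 pending = cur
--                 cur = []
--
--     if pending is not None:
--         pack(pending)
--     if cur:
--         pack(cur)
--     if chunk:
--         chunks.append(chunk)
--     return chunks
-- ===== Notes on version B (the rewrite author's own statement) =====
-- stated objective: simpler
-- what changed: B fuses A's two passes (build a full intermediate sentences list, then greedily pack it) into a single pass over the tokens with no intermediate list: a 'pending' sentence is held open for trailing punctuation/space and packed into the current chunk as soon as the next sentence starts closing.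
import Mathlib
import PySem

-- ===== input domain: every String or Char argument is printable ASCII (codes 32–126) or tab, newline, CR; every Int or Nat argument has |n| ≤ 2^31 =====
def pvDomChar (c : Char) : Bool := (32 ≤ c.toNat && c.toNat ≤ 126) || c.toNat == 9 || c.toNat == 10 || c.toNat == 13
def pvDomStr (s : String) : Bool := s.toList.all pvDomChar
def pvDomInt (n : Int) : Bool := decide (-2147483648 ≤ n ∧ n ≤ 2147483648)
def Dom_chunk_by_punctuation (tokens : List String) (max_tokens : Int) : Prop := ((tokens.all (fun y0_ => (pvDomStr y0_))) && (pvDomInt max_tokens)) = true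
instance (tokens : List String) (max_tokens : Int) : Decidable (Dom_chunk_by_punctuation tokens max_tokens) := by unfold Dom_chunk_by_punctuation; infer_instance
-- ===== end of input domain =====

-- B fuses A's two passes (sentence splitting, then greedy packing) into one pass that
-- packs each sentence as soon as it can no longer receive trailing punctuation — objective: simpler single-pass decomposition, same cost.

-- ===== PORT A =====

def pvPunctuation : List String :=
  [";", ":", ",", ".", "!", "?", "；", "：", "，", "。", "！", "？", "、", "…", "·"]

def pvIsPunct (t : String) : Bool := pvPunctuation.contains t

-- Python `sentences[-1].append(token)` (only reached when `sentences` is nonempty)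
def pvAppendLast : List (List String) → String → List (List String)
  | [], _ => []
  | [s], t => [s ++ [t]]
  | s :: s' :: rest, t => s :: pvAppendLast (s' :: rest) t

-- body of A's first `for token in tokens` loop, state = (sentences, current_sentence)
def pvStepA (st : List (List String) × List String) (token : String) :
    List (List String) × List String :=
  let (sentences, cur) := st
  if cur.length = 0 ∧ sentences.length ≠ 0 ∧ (pvIsPunct token ∨ token = " ") then
    (pvAppendLast sentences token, cur)
  else
    let cur := cur ++ [token]
    if pvIsPunct token then (sentences ++ [cur], []) else (sentences, cur)

-- body of A's second `for sentence in sentences` loop, state = (chunks, current_chunk)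
def pvPackA (max_tokens : Int) (st : List (List String) × List String) (sentence : List String) :
    List (List String) × List String :=
  let (chunks, chunk) := st
  if (chunk.length : Int) + (sentence.length : Int) ≤ max_tokens then
    (chunks, chunk ++ sentence)
  else
    ((if chunk ≠ [] then chunks ++ [chunk] else chunks), sentence)

def chunk_by_punctuation (tokens : List String) (max_tokens : Int) : List (List String) :=
  let (sentences, cur) := tokens.foldl pvStepA ([], [])
  let sentences := if cur ≠ [] then sentences ++ [cur] else sentences
  let (chunks, chunk) := sentences.foldl (pvPackA max_tokens) ([], [])
  if chunk ≠ [] then chunks ++ [chunk] else chunks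

-- ===== PORT B =====

-- B's nested `pack` helper, state = (chunks, chunk)
def pvPackB (max_tokens : Int) (st : List (List String) × List String) (s : List String) :
    List (List String) × List String :=
  let (chunks, chunk) := st
  if (chunk.length : Int) + (s.length : Int) ≤ max_tokens then
    (chunks, chunk ++ s)
  else
    ((if chunk ≠ [] then chunks ++ [chunk] else chunks), s)

-- body of B's single loop, state = ((chunks, chunk), pending, cur)
def pvStepB (max_tokens : Int)
    (st : (List (List String) × List String) × Option (List String) × List String)
    (token : String) :
    (List (List String) × List String) × Option (List String) × List String :=
  let (cc, pending, cur) := st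
  match pending with
  | some p =>
    if cur.length = 0 ∧ (pvIsPunct token ∨ token = " ") then
      (cc, some (p ++ [token]), cur)
    else
      let cur := cur ++ [token]
      if pvIsPunct token then (pvPackB max_tokens cc p, some cur, [])
      else (cc, some p, cur)
  | none =>
    let cur := cur ++ [token]
    if pvIsPunct token then (cc, some cur, []) else (cc, none, cur)

def chunk_by_punctuation_alt (tokens : List String) (max_tokens : Int) : List (List String) :=
  let (cc, pending, cur) := tokens.foldl (pvStepB max_tokens) (([], []), none, [])
  let cc := match pending with
    | some p => pvPackB max_tokens cc p
    | none => cc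
  let cc := if cur ≠ [] then pvPackB max_tokens cc cur else cc
  if cc.2 ≠ [] then cc.1 ++ [cc.2] else cc.1

-- ===== PRECONDITION & SPEC =====
def Spec_chunk_by_punctuation (tokens : List String) (max_tokens : Int) (out : List (List String)) : Prop := out = chunk_by_punctuation_alt tokens max_tokens
instance (tokens : List String) (max_tokens : Int) (out : List (List String)) : Decidable (Spec_chunk_by_punctuation tokens max_tokens out) := by unfold Spec_chunk_by_punctuation; infer_instance

-- ===== CLAIM (what is proved, stated in full; the proofs are below) =====
def Claim_equal_chunk_by_punctuation : Prop := ∀ (tokens : List String) (max_tokens : Int), Dom_chunk_by_punctuation tokens max_tokens → Spec_chunk_by_punctuation tokens max_tokens (chunk_by_punctuation tokens max_tokens)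

-- ===== LEMMAS AND PROOFS =====

-- B's pending sentence is A's last (still-open-for-trailing-tokens) sentence; everything
-- before it is already packed in B.
def pvInv (max_tokens : Int) (stA : List (List String) × List String)
    (stB : (List (List String) × List String) × Option (List String) × List String) : Prop :=
  stB.2.2 = stA.2 ∧
  (match stB.2.1 with
   | none => stA.1 = [] ∧ stB.1 = ([], [])
   | some p => ∃ ss, stA.1 = ss ++ [p] ∧ stB.1 = ss.foldl (pvPackA max_tokens) ([], []))

lemma pvAppendLast_concat (ss : List (List String)) (p : List String) (t : String) :
    pvAppendLast (ss ++ [p]) t = ss ++ [p ++ [t]] := by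
  induction ss with
  | nil => simp [pvAppendLast]
  | cons a as ih =>
    cases as with
    | nil => simp [pvAppendLast]
    | cons b bs => simpa [pvAppendLast] using ih

lemma pvPackB_eq (max_tokens : Int) (st : List (List String) × List String) (s : List String) :
    pvPackB max_tokens st s = pvPackA max_tokens st s := rfl

lemma pvInv_step (max_tokens : Int) (stA) (stB) (h : pvInv max_tokens stA stB) (t : String) :
    pvInv max_tokens (pvStepA stA t) (pvStepB max_tokens stB t) := by
  obtain ⟨ccB, pend, curB⟩ := stB
  obtain ⟨ssA, curA⟩ := stA
  obtain ⟨hcur, hp⟩ := h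
  simp only at hcur
  subst hcur
  cases pend with
  | none =>
    obtain ⟨h1, h2⟩ := hp
    subst h1; subst h2
    by_cases hpunct : pvIsPunct t = true
    · simp [pvStepA, pvStepB, pvInv, hpunct]
    · simp [pvStepA, pvStepB, pvInv, hpunct]
  | some p =>
    obtain ⟨ss, h1, h2⟩ := hp
    subst h1
    by_cases hc : curB.length = 0 ∧ (pvIsPunct t = true ∨ t = " ")
    · -- trailing-attach branch on both sides
      have hcA : curB.length = 0 ∧ (ss ++ [p]).length ≠ 0 ∧ (pvIsPunct t = true ∨ t = " ") :=
        ⟨hc.1, by simp, hc.2⟩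
      simp only [pvInv, pvStepA, pvStepB, if_pos hc, if_pos hcA]
      exact ⟨trivial, ss, by rw [pvAppendLast_concat], h2⟩
    · have hcA : ¬ (curB.length = 0 ∧ (ss ++ [p]).length ≠ 0 ∧ (pvIsPunct t = true ∨ t = " ")) := by
        rintro ⟨a, _, c⟩; exact hc ⟨a, c⟩
      simp only [pvInv, pvStepA, pvStepB, if_neg hc, if_neg hcA]
      by_cases hpunct : pvIsPunct t = true
      · simp only [if_pos hpunct]
        refine ⟨trivial, ss ++ [p], by simp, ?_⟩
        rw [List.foldl_append, ← h2]
        simp [pvPackB_eq]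
      · simp only [if_neg hpunct]
        exact ⟨trivial, ss, rfl, h2⟩

lemma pvInv_foldl (max_tokens : Int) (tokens : List String) (stA stB)
    (h : pvInv max_tokens stA stB) :
    pvInv max_tokens (tokens.foldl pvStepA stA) (tokens.foldl (pvStepB max_tokens) stB) := by
  induction tokens generalizing stA stB with
  | nil => exact h
  | cons t ts ih => exact ih _ _ (pvInv_step _ _ _ h t)

theorem pvMain (tokens : List String) (max_tokens : Int) :
    chunk_by_punctuation tokens max_tokens = chunk_by_punctuation_alt tokens max_tokens := by
  have h := pvInv_foldl max_tokens tokens ([], []) (([], []), none, [])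
    ⟨rfl, rfl, rfl⟩
  unfold chunk_by_punctuation chunk_by_punctuation_alt
  rcases hA : tokens.foldl pvStepA ([], []) with ⟨ssA, curA⟩
  rcases hB : tokens.foldl (pvStepB max_tokens) (([], []), none, []) with ⟨ccB, pend, curB⟩
  rw [hA, hB] at h
  obtain ⟨hcur, hp⟩ := h
  simp only at hcur hp
  subst hcur
  cases pend with
  | none =>
    obtain ⟨h1, h2⟩ := hp
    subst h1; subst h2
    by_cases hcur : curB = []
    · simp [hcur]
    · simp [hcur, pvPackB_eq]
  | some p =>
    obtain ⟨ss, h1, h2⟩ := hp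
    subst h1
    by_cases hcur : curB = []
    · simp only [hcur, ne_eq, not_true_eq_false, if_false]
      rw [List.foldl_append, ← h2, pvPackB_eq]
      simp
    · simp only [ne_eq, hcur, not_false_eq_true, if_true]
      rw [List.foldl_append, List.foldl_append, ← h2]
      simp [pvPackB_eq]

-- ===== VERDICT (by name: the statement is the Claim_ definition above) =====
theorem chunk_by_punctuation_spec : Claim_equal_chunk_by_punctuation := by
  intro tokens max_tokens _
  unfold Spec_chunk_by_punctuation
  exact pvMain tokens max_tokens
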